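-- pv_equiv track=rewrite | github.com/kgbercan/IAI-Scripts | tgComp_v2.py | agreements
-- ===== SOURCE A (Python) =====
-- def agreements(row):
-- 	row = cleanUp(row)
--
-- 	agreements = 0
-- 	total = 0
-- 	#for each labeler on this word
-- 	for i in range(len(row)-1):
-- 		#for each label on the word
-- 		for j in range(len(row[i])):
-- 			#variable to walk through next labelers
-- 			i2 = i
-- 			#while there's another labeler to compare
-- 			while(i2<len(row)-1):
-- 				#increment the labeler index
-- 				i2 += 1
-- 				if(row[i][j]==row[i2][j]):
-- 					agreements += 1
-- 				total+=1
--
-- 	agreements = str(agreements) + "/" + str(total)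
--
-- 	return(agreements)
--
-- def cleanUp(labels):
--
-- 	for i in range(len(labels)):
-- 		labels[i] = labels[i].strip()
-- 		#-1 means there IS NOT a space and thus this has only one label
-- 		if(labels[i].find(" ")==-1):
-- 			#a boundary tone WOULD have a % mark so -1 means this is NOT a boundary tone
-- 			if(labels[i].find("%")==-1):
-- 				#add a space at the end to hold the place of a boundary tone annotation
-- 				labels[i] = labels[i] + " "
-- 			#if this IS a boundary tone...
-- 			else:
-- 				#add a space at the beginning to hold the place of a pitch accent annotation
-- 				labels[i] = " " + labels[i]
-- 		labels[i] = labels[i].split(" ")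
--
-- 	return(labels)
-- ===== SOURCE B (Python) =====
-- def agreements(row):
--     # One pass over labelers with hash tallies (O(n*L)) instead of comparing
--     # every pair of labelers (O(n^2 * L)).  Return value only: unlike A, this
--     # does not mutate `row` in place.
--     cleaned = []
--     for s in row:
--         s = s.strip()
--         if " " not in s:
--             s = (s + " ") if "%" not in s else (" " + s)
--         cleaned.append(s.split(" "))
--     agree = 0
--     total = 0
--     seen = {}   # (position, label) -> number of earlier labelers with that label there
--     cnt = {}    # position -> number of earlier labelers that have that position
--     for c in cleaned:
--         for j, x in enumerate(c):
--             agree += seen.get((j, x), 0)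
--             total += cnt.get(j, 0)
--             seen[(j, x)] = seen.get((j, x), 0) + 1
--             cnt[j] = cnt.get(j, 0) + 1
--     return str(agree) + "/" + str(total)
-- ===== Notes on version B (the rewrite author's own statement) =====
-- stated objective: faster
-- what changed: Instead of comparing every pair of labelers position by position (triple nested loop), B makes one pass over the labelers keeping hash tallies of (position,label) occurrences and of how many earlier labelers reach each position, adding the tally before updating it; A also mutates its argument in place (cleanUp), B does not.
import Mathlib
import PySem

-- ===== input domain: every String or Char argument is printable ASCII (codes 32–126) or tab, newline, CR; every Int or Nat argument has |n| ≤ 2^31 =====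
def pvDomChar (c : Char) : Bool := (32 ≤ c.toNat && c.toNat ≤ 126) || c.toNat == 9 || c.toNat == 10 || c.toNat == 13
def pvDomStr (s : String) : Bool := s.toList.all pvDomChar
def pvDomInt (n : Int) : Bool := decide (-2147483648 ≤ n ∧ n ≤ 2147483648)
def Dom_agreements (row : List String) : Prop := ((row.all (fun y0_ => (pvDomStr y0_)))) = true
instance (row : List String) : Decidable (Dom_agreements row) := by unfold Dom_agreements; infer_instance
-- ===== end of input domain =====

-- B replaces A's pairwise O(n^2*L) comparison loops by one O(n*L) pass with hash tallies;
-- return value only: A mutates `row` in place (cleanUp), B does not.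

-- ===== PORT A =====
-- cleanUp applied to one label string (A rebinds labels[i]; elementwise, so the whole
-- cleanUp loop is `row.map pvClean`).  Ported on List Char via PySem.Chars (exact).
def pvClean (s : String) : List (List Char) :=
  let t := PySem.Chars.strip s.toList
  if PySem.Chars.find t [' '] = -1 then
    if PySem.Chars.find t ['%'] = -1 then
      PySem.Chars.splitOn (t ++ [' ']) [' ']
    else
      PySem.Chars.splitOn ([' '] ++ t) [' ']
  else PySem.Chars.splitOn t [' ']

-- the `while(i2<len(row)-1)` loop of A.  row[i][j] / row[i2][j] are read with getD []:
-- Python raises IndexError exactly where j is out of range for row[i2], and those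
-- inputs are excluded by Pre_agreements, so the default is never reached under Pre_.
def pvWhileA (rows : List (List (List Char))) (i j : Nat) (i2 : Nat) (st : Int × Int) :
    Int × Int :=
  if i2 < rows.length - 1 then
    let st' := if (rows.getD i []).getD j [] = (rows.getD (i2 + 1) []).getD j []
               then (st.1 + 1, st.2 + 1) else (st.1, st.2 + 1)
    pvWhileA rows i j (i2 + 1) st'
  else st
termination_by rows.length - 1 - i2

def agreements (row : List String) : String :=
  let rows := row.map pvClean
  let st := (List.range (rows.length - 1)).foldl
    (fun st i =>
      (List.range ((rows.getD i []).length)).foldl (fun st2 j => pvWhileA rows i j i st2) st)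
    ((0 : Int), (0 : Int))
  PySem.Int.toStr st.1 ++ "/" ++ PySem.Int.toStr st.2

-- ===== PORT B =====
-- B's cleanup of one label string (B phrases the test with `in` instead of find == -1)
def pvCleanB (s : String) : List (List Char) :=
  let t := PySem.Chars.strip s.toList
  let t' := if PySem.Chars.isIn [' '] t = false then
              (if PySem.Chars.isIn ['%'] t = false then t ++ [' '] else [' '] ++ t)
            else t
  PySem.Chars.splitOn t' [' ']

-- the body of B's inner loop: read both tallies, then bump them
def pvStepB (st : Int × Int × PySem.Dict (Int × List Char) Int × PySem.Dict Int Int)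
    (jx : Int × List Char) :
    Int × Int × PySem.Dict (Int × List Char) Int × PySem.Dict Int Int :=
  match st, jx with
  | (ag, tot, seen, cnt), (j, x) =>
    (ag + seen.getD (j, x) 0, tot + cnt.getD j 0,
     seen.insert (j, x) (seen.getD (j, x) 0 + 1),
     cnt.insert j (cnt.getD j 0 + 1))

def agreements_alt (row : List String) : String :=
  let cleaned := row.foldl (fun acc s => acc ++ [pvCleanB s]) []
  let st := cleaned.foldl
    (fun st c => (PySem.List.enumerate c).foldl pvStepB st)
    ((0 : Int), (0 : Int), PySem.Dict.empty, PySem.Dict.empty)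
  PySem.Int.toStr st.1 ++ "/" ++ PySem.Int.toStr st.2.1

-- ===== PRECONDITION & SPEC =====
-- Pre_ holds exactly when A returns: A raises IndexError iff the cleaned label lists
-- do not have nondecreasing lengths (row[i2][j] with j < len(row[i]) out of range).
def Pre_agreements (row : List String) : Prop :=
  List.Pairwise (fun a b => (pvClean a).length ≤ (pvClean b).length) row
instance (row : List String) : Decidable (Pre_agreements row) := by
  unfold Pre_agreements; infer_instance

def pvWitness_agreements : List String := ["H*", "H* L-L%"]

def Spec_agreements (row : List String) (out : String) : Prop := out = agreements_alt row
instance (row : List String) (out : String) : Decidable (Spec_agreements row out) := by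
  unfold Spec_agreements; infer_instance

-- ===== CLAIM (what is proved, stated in full; the proofs are below) =====
def Claim_equal_agreements : Prop :=
  ∀ (row : List String), Dom_agreements row → Pre_agreements row →
    Spec_agreements row (agreements row)

-- ===== LEMMAS AND PROOFS =====

-- abbreviations for the proofs: a labeler's cleaned labels are a `List (List Char)`
-- per-pair counts over the positions both labelers share
def gAg (a b : List (List Char)) : Int :=
  ((List.range (min a.length b.length)).countP
    (fun j => decide (a.getD j [] = b.getD j [])) : Int)
def gTot (a b : List (List Char)) : Int := ((min a.length b.length : Nat) : Int)

-- pair sums over all ordered pairs (earlier, later)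
def pairsAg : List (List (List Char)) → Int
  | [] => 0
  | c :: r => (r.map (fun d => gAg c d)).sum + pairsAg r
def pairsTot : List (List (List Char)) → Int
  | [] => 0
  | c :: r => (r.map (fun d => gTot c d)).sum + pairsTot r


-- ---------- A-side: characterize the nested loops ----------

-- the while loop adds, to the running pair, the number of later labelers agreeing at j
-- and the number of later labelers
lemma pvWhileA_eq (rows : List (List (List Char))) (i j : Nat) :
    ∀ (fuel i2 : Nat), rows.length - 1 - i2 = fuel → ∀ (st : Int × Int),
    pvWhileA rows i j i2 st =
      (st.1 + ((rows.drop (i2 + 1)).countP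
          (fun d => decide ((rows.getD i []).getD j [] = d.getD j [])) : Int),
       st.2 + ((rows.length - 1 - i2 : Nat) : Int)) := by
  intro fuel
  induction fuel with
  | zero =>
    intro i2 h st
    have hge : ¬ i2 < rows.length - 1 := by omega
    rw [pvWhileA]
    have hdrop : rows.drop (i2 + 1) = [] := List.drop_eq_nil_of_le (by omega)
    simp [hge, hdrop, h]
  | succ n ih =>
    intro i2 h st
    have hlt : i2 < rows.length - 1 := by omega
    have hlen : i2 + 1 < rows.length := by omega
    rw [pvWhileA]
    rw [if_pos hlt, ih (i2 + 1) (by omega)]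
    rw [List.drop_eq_getElem_cons hlen, List.countP_cons]
    rw [List.getD_eq_getElem rows [] hlen]
    by_cases hc : (rows.getD i []).getD j [] = rows[i2 + 1].getD j []
    · simp only [if_pos hc, hc, decide_true, if_pos rfl]
      refine Prod.ext ?_ ?_ <;> simp <;> push_cast <;> omega
    · simp only [if_neg hc, hc, decide_false]
      refine Prod.ext ?_ ?_ <;> simp [hc] <;> push_cast <;> omega

-- a loop adding independent amounts to both accumulators
lemma pv_foldl_pair_add {alpha : Type} (f g : alpha → Int) :
    ∀ (l : List alpha) (st : Int × Int),
    l.foldl (fun st x => (st.1 + f x, st.2 + g x)) st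
      = (st.1 + (l.map f).sum, st.2 + (l.map g).sum) := by
  intro l
  induction l with
  | nil => intro st; simp
  | cons x l ih => intro st; simp [ih]; constructor <;> ring

-- per-labeler contributions of A's two inner loops
def pvAgF (rows : List (List (List Char))) (i : Nat) : Int :=
  ((List.range ((rows.getD i []).length)).map (fun j =>
    (((rows.drop (i + 1)).countP
        (fun d => decide ((rows.getD i []).getD j [] = d.getD j []))) : Int))).sum
def pvTotF (rows : List (List (List Char))) (i : Nat) : Int :=
  ((rows.getD i []).length : Int) * ((rows.length - 1 - i : Nat) : Int)

lemma pv_innerA (rows : List (List (List Char))) (i : Nat) (st : Int × Int) :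
    (List.range ((rows.getD i []).length)).foldl (fun st2 j => pvWhileA rows i j i st2) st
      = (st.1 + pvAgF rows i, st.2 + pvTotF rows i) := by
  have hstep : (fun (st2 : Int × Int) (j : Nat) => pvWhileA rows i j i st2)
      = (fun st2 j => (st2.1 + (((rows.drop (i + 1)).countP
            (fun d => decide ((rows.getD i []).getD j [] = d.getD j []))) : Int),
          st2.2 + ((rows.length - 1 - i : Nat) : Int))) :=
    funext fun st2 => funext fun j => pvWhileA_eq rows i j _ i rfl st2
  rw [hstep, pv_foldl_pair_add]
  unfold pvAgF pvTotF
  rw [PySem.List.sum_map_const_int]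
  simp [mul_comm]

lemma pv_outerA (rows : List (List (List Char))) :
    (List.range (rows.length - 1)).foldl
        (fun st i => (List.range ((rows.getD i []).length)).foldl
          (fun st2 j => pvWhileA rows i j i st2) st) ((0 : Int), (0 : Int))
      = (((List.range (rows.length - 1)).map (pvAgF rows)).sum,
         ((List.range (rows.length - 1)).map (pvTotF rows)).sum) := by
  have hstep : (fun (st : Int × Int) (i : Nat) =>
      (List.range ((rows.getD i []).length)).foldl (fun st2 j => pvWhileA rows i j i st2) st)
      = (fun st i => (st.1 + pvAgF rows i, st.2 + pvTotF rows i)) :=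
    funext fun st => funext fun i => pv_innerA rows i st
  rw [hstep, pv_foldl_pair_add]
  simp

-- a sum over range (n-1) whose (would-be) last term vanishes is the sum over range n
lemma pv_range_pred_sum (f : Nat → Int) (n : Nat) (h : ∀ m, n = m + 1 → f m = 0) :
    ((List.range n).map f).sum = ((List.range (n - 1)).map f).sum := by
  cases n with
  | zero => rfl
  | succ m => rw [List.range_succ]; simp [h m rfl]

-- exchange: summing the agreeing later labelers over the positions of an earlier labeler
-- is summing the shared-position agreements over the later labelers
lemma pv_exchangeAg (c : List (List Char)) :
    ∀ (p : List (List (List Char))), (∀ d ∈ p, c.length ≤ d.length) →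
    ((List.range c.length).map (fun j =>
        ((p.countP (fun d => decide (c.getD j [] = d.getD j []))) : Int))).sum
      = (p.map (fun d => gAg c d)).sum := by
  intro p
  induction p with
  | nil => simp
  | cons d p ih =>
    intro h
    have hc : c.length ≤ d.length := h d (by simp)
    have hsplit : ((List.range c.length).map (fun j =>
        (((d :: p).countP (fun d' => decide (c.getD j [] = d'.getD j []))) : Int))).sum
        = ((List.range c.length).map (fun j =>
            (if (fun j => decide (c.getD j [] = d.getD j [])) j then (1 : Int) else 0)
            + ((p.countP (fun d' => decide (c.getD j [] = d'.getD j []))) : Int))).sum := by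
      refine congrArg List.sum (List.map_congr_left ?_)
      intro j _
      rw [List.countP_cons]
      by_cases hh : c.getD j [] = d.getD j [] <;> simp [hh] <;> push_cast <;> ring
    rw [hsplit, PySem.List.sum_map_add_int, PySem.List.sum_map_ite_one_zero,
        ih (fun d' hd' => h d' (by simp [hd']))]
    have hg : gAg c d = ((List.range c.length).countP
        (fun j => decide (c.getD j [] = d.getD j [])) : Int) := by
      unfold gAg; rw [Nat.min_eq_left hc]
    rw [List.map_cons, List.sum_cons, hg]

lemma pv_constTot (c : List (List Char)) :
    ∀ (p : List (List (List Char))), (∀ d ∈ p, c.length ≤ d.length) →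
    (p.map (fun d => gTot c d)).sum = (p.length : Int) * (c.length : Int) := by
  intro p
  induction p with
  | nil => simp
  | cons d p ih =>
    intro h
    have hc : c.length ≤ d.length := h d (by simp)
    have : gTot c d = (c.length : Int) := by unfold gTot; rw [Nat.min_eq_left hc]
    rw [List.map_cons, List.sum_cons, this, ih (fun d' hd' => h d' (by simp [hd']))]
    simp only [List.length_cons]
    push_cast; ring

-- A's index sums equal the structural pair sums (under nondecreasing lengths)
lemma pv_sumA : ∀ (rows : List (List (List Char))),
    rows.Pairwise (fun a b => a.length ≤ b.length) →
    ((List.range rows.length).map (pvAgF rows)).sum = pairsAg rows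
    ∧ ((List.range rows.length).map (pvTotF rows)).sum = pairsTot rows := by
  intro rows
  induction rows with
  | nil => intro _; simp [pairsAg, pairsTot]
  | cons c rest ih =>
    intro h
    obtain ⟨h1, h2⟩ := List.pairwise_cons.mp h
    have hlen : (c :: rest).length = rest.length + 1 := by simp
    rw [hlen, List.range_succ_eq_map]
    have hAg0 : pvAgF (c :: rest) 0 = (rest.map (fun d => gAg c d)).sum := by
      unfold pvAgF
      simp only [List.getD_cons_zero, List.drop_succ_cons, List.drop_zero]
      exact pv_exchangeAg c rest h1
    have hTot0 : pvTotF (c :: rest) 0 = (rest.map (fun d => gTot c d)).sum := by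
      unfold pvTotF
      rw [pv_constTot c rest h1]
      simp only [List.getD_cons_zero, List.length_cons]
      have he : rest.length + 1 - 1 - 0 = rest.length := by omega
      rw [he]; ring
    have hshiftAg : ∀ i, pvAgF (c :: rest) (i + 1) = pvAgF rest i := by
      intro i; unfold pvAgF
      simp only [List.getD_cons_succ, List.drop_succ_cons]
    have hshiftTot : ∀ i, pvTotF (c :: rest) (i + 1) = pvTotF rest i := by
      intro i; unfold pvTotF
      simp only [List.getD_cons_succ, List.length_cons]
      congr 2
      omega
    have hmapAg : ((List.range rest.length).map Nat.succ).map (pvAgF (c :: rest))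
        = (List.range rest.length).map (pvAgF rest) := by
      rw [List.map_map]
      exact List.map_congr_left (fun i _ => hshiftAg i)
    have hmapTot : ((List.range rest.length).map Nat.succ).map (pvTotF (c :: rest))
        = (List.range rest.length).map (pvTotF rest) := by
      rw [List.map_map]
      exact List.map_congr_left (fun i _ => hshiftTot i)
    obtain ⟨ihAg, ihTot⟩ := ih h2
    constructor
    · rw [List.map_cons, List.sum_cons, hmapAg, hAg0, ihAg]; rfl
    · rw [List.map_cons, List.sum_cons, hmapTot, hTot0, ihTot]; rfl

-- A computes the structural pair sums
lemma pv_A_val (row : List String) (h : Pre_agreements row) :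
    agreements row = PySem.Int.toStr (pairsAg (row.map pvClean)) ++ "/"
      ++ PySem.Int.toStr (pairsTot (row.map pvClean)) := by
  have hpw : (row.map pvClean).Pairwise (fun a b => a.length ≤ b.length) :=
    (List.pairwise_map).mpr h
  obtain ⟨hag, htot⟩ := pv_sumA (row.map pvClean) hpw
  have hzAg : ∀ m, (row.map pvClean).length = m + 1 → pvAgF (row.map pvClean) m = 0 := by
    intro m hm
    unfold pvAgF
    have : (row.map pvClean).drop (m + 1) = [] := List.drop_eq_nil_of_le (by omega)
    simp [this]
  have hzTot : ∀ m, (row.map pvClean).length = m + 1 → pvTotF (row.map pvClean) m = 0 := by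
    intro m hm
    unfold pvTotF
    have h0 : (row.map pvClean).length - 1 - m = 0 := by omega
    rw [h0]
    simp
  unfold agreements
  simp only []
  rw [pv_outerA]
  rw [← pv_range_pred_sum _ _ hzAg, ← pv_range_pred_sum _ _ hzTot, hag, htot]

-- ---------- B-side: characterize the tally pass ----------

-- B's cleanup computes A's
lemma pvCleanB_eq (s : String) : pvCleanB s = pvClean s := by
  unfold pvClean pvCleanB
  by_cases h1 : ([' '] <:+: PySem.Chars.strip s.toList)
  · have hf : ¬ PySem.Chars.find (PySem.Chars.strip s.toList) [' '] = -1 := by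
      rw [PySem.Chars.find_eq_neg_one_iff]; simpa
    have hi : PySem.Chars.isIn [' '] (PySem.Chars.strip s.toList) = true :=
      (PySem.Chars.isIn_iff_infix _ _).mpr h1
    simp [hf, hi]
  · have hf : PySem.Chars.find (PySem.Chars.strip s.toList) [' '] = -1 :=
      (PySem.Chars.find_eq_neg_one_iff _ _).mpr h1
    have hi : PySem.Chars.isIn [' '] (PySem.Chars.strip s.toList) = false :=
      (PySem.Chars.isIn_eq_false_iff _ _).mpr h1
    by_cases h2 : (['%'] <:+: PySem.Chars.strip s.toList)
    · have hf2 : ¬ PySem.Chars.find (PySem.Chars.strip s.toList) ['%'] = -1 := by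
        rw [PySem.Chars.find_eq_neg_one_iff]; simpa
      have hi2 : PySem.Chars.isIn ['%'] (PySem.Chars.strip s.toList) = true :=
        (PySem.Chars.isIn_iff_infix _ _).mpr h2
      simp [hf, hi, hf2, hi2]
    · have hf2 : PySem.Chars.find (PySem.Chars.strip s.toList) ['%'] = -1 :=
        (PySem.Chars.find_eq_neg_one_iff _ _).mpr h2
      have hi2 : PySem.Chars.isIn ['%'] (PySem.Chars.strip s.toList) = false :=
        (PySem.Chars.isIn_eq_false_iff _ _).mpr h2
      simp [hf, hi, hf2, hi2]

-- abstract contents of B's tallies after processing the labelers in p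
def pvCntSeen (p : List (List (List Char))) (k : Nat) (x : List Char) : Nat :=
  p.countP (fun d => decide (k < d.length ∧ d.getD k [] = x))
def pvCntAt (p : List (List (List Char))) (k : Nat) : Nat :=
  p.countP (fun d => decide (k < d.length))
def pvInvS (seen : PySem.Dict (Int × List Char) Int) (p : List (List (List Char))) : Prop :=
  ∀ (k : Nat) (x : List Char), seen.getD ((k : Int), x) 0 = (pvCntSeen p k x : Int)
def pvInvC (cnt : PySem.Dict Int Int) (p : List (List (List Char))) : Prop :=
  ∀ (k : Nat), cnt.getD (k : Int) 0 = (pvCntAt p k : Int)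

-- a tally loop over distinct keys bumps each key's count by its multiplicity
lemma pv_getD_foldl_insert_key {alpha kappa : Type} [DecidableEq kappa] [BEq kappa]
    [LawfulBEq kappa] (key : alpha → kappa) :
    ∀ (l : List alpha) (d : PySem.Dict kappa Int) (q : kappa), (l.map key).Nodup →
    (l.foldl (fun d a => d.insert (key a) (d.getD (key a) 0 + 1)) d).getD q 0
      = d.getD q 0 + ((l.map key).count q : Int) := by
  intro l
  induction l with
  | nil => intro d q _; simp
  | cons a l ih =>
    intro d q hnd
    simp only [List.map_cons, List.nodup_cons] at hnd
    obtain ⟨ha, hnd⟩ := hnd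
    simp only [List.foldl_cons]
    rw [ih _ _ hnd, PySem.Dict.getD_insert]
    simp only [List.map_cons, List.count_cons]
    by_cases hq : q = key a
    · subst hq
      have h0 : (l.map key).count (key a) = 0 := List.count_eq_zero.mpr ha
      simp [h0]
    · have hb : (q == key a) = false := by simp [hq]
      have hne : ¬ key a = q := fun h => hq h.symm
      simp [hq, hb, hne]

lemma pv_enum_eq (c : List (List Char)) :
    PySem.List.enumerate c = (List.range c.length).map (fun (k : Nat) => ((k : Int), c.getD k [])) := by
  rw [PySem.List.enumerate_eq_map_pyRange c []]
  simp only [PySem.List.len_eq, PySem.List.pyRange_zero_natCast, List.map_map]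
  refine List.map_congr_left ?_
  intro k _
  simp

lemma pv_nodup_fst_enum (c : List (List Char)) :
    ((PySem.List.enumerate c).map Prod.fst).Nodup := by
  rw [pv_enum_eq, List.map_map]
  refine List.Nodup.map ?_ List.nodup_range
  intro a b hab
  simpa using hab

-- one inner pass over enumerate(c): counts read from the dicts, then the dicts bumped
lemma pv_innerB :
    ∀ (ps : List (Int × List Char)), (ps.map Prod.fst).Nodup →
    ∀ (ag tot : Int) (seen : PySem.Dict (Int × List Char) Int) (cnt : PySem.Dict Int Int),
    ps.foldl pvStepB (ag, tot, seen, cnt)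
      = (ag + (ps.map (fun q => seen.getD q 0)).sum,
         tot + (ps.map (fun q => cnt.getD q.1 0)).sum,
         ps.foldl (fun d q => d.insert q (d.getD q 0 + 1)) seen,
         ps.foldl (fun d q => d.insert q.1 (d.getD q.1 0 + 1)) cnt) := by
  intro ps
  induction ps with
  | nil => intro _ ag tot seen cnt; simp
  | cons q ps ih =>
    intro hnd ag tot seen cnt
    simp only [List.map_cons, List.nodup_cons] at hnd
    obtain ⟨hq, hnd⟩ := hnd
    obtain ⟨j, x⟩ := q
    simp only [List.foldl_cons, pvStepB]
    rw [ih hnd]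
    have hseen : ∀ q' ∈ ps, (seen.insert (j, x) (seen.getD (j, x) 0 + 1)).getD q' 0
        = seen.getD q' 0 := by
      intro q' hq'
      rw [PySem.Dict.getD_insert, if_neg ?_]
      intro hcontra
      have h1 : q'.1 = j := by rw [hcontra]
      have hmem : q'.1 ∈ ps.map Prod.fst := List.mem_map_of_mem (f := Prod.fst) hq'
      rw [h1] at hmem
      exact hq hmem
    have hcnt : ∀ q' ∈ ps, (cnt.insert j (cnt.getD j 0 + 1)).getD q'.1 0
        = cnt.getD q'.1 0 := by
      intro q' hq'
      rw [PySem.Dict.getD_insert, if_neg ?_]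
      intro hcontra
      have hmem : q'.1 ∈ ps.map Prod.fst := List.mem_map_of_mem (f := Prod.fst) hq'
      rw [hcontra] at hmem
      exact hq hmem
    refine Prod.ext ?_ (Prod.ext ?_ rfl)
    · simp only [List.map_cons, List.sum_cons]
      rw [List.map_congr_left (fun q' hq' => hseen q' hq')]
      ring
    · simp only [List.map_cons, List.sum_cons]
      rw [List.map_congr_left (fun q' hq' => hcnt q' hq')]
      ring

-- counting in range
lemma pv_countP_lt (m : Nat) : ∀ (n : Nat),
    (List.range n).countP (fun k => decide (k < m)) = min m n := by
  intro n
  induction n with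
  | zero => simp
  | succ n ih =>
    rw [List.range_succ, List.countP_append, ih]
    by_cases h : n < m <;> simp [h] <;> omega

lemma pv_countP_min (d c : List (List Char)) :
    (List.range c.length).countP (fun k => decide (k < d.length ∧ d.getD k [] = c.getD k []))
      = (List.range (min d.length c.length)).countP
          (fun k => decide (d.getD k [] = c.getD k [])) := by
  rcases Nat.le_total c.length d.length with h | h
  · rw [Nat.min_eq_right h]
    rw [List.countP_eq_length_filter, List.countP_eq_length_filter]
    congr 1
    refine List.filter_congr ?_
    intro k hk
    have : k < d.length := lt_of_lt_of_le (List.mem_range.mp hk) h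
    simp [this]
  · have hc : c.length = d.length + (c.length - d.length) := by omega
    rw [Nat.min_eq_left h]
    rw [hc, List.range_add, List.countP_append, List.countP_map]
    have h2 : (List.range (c.length - d.length)).countP
        ((fun k => decide (k < d.length ∧ d.getD k [] = c.getD k [])) ∘ (d.length + ·)) = 0 := by
      refine List.countP_eq_zero.mpr ?_
      intro k _
      simp
    rw [h2]
    have h1 : (List.range d.length).countP
        (fun k => decide (k < d.length ∧ d.getD k [] = c.getD k []))
        = (List.range d.length).countP (fun k => decide (d.getD k [] = c.getD k [])) := by
      rw [List.countP_eq_length_filter, List.countP_eq_length_filter]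
      congr 1
      refine List.filter_congr ?_
      intro k hk
      have : k < d.length := List.mem_range.mp hk
      simp [this]
    rw [h1]
    omega

-- exchanges: a column-wise read of the tallies is the row-wise pair sum
lemma pv_exchangeB_ag (c : List (List Char)) :
    ∀ (p : List (List (List Char))),
    ((List.range c.length).map (fun k => (pvCntSeen p k (c.getD k []) : Int))).sum
      = (p.map (fun d => gAg d c)).sum := by
  intro p
  induction p with
  | nil => simp [pvCntSeen]
  | cons d p ih =>
    have hsplit : ((List.range c.length).map (fun k => (pvCntSeen (d :: p) k (c.getD k []) : Int))).sum
        = ((List.range c.length).map (fun k =>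
            (if (fun k => decide (k < d.length ∧ d.getD k [] = c.getD k [])) k then (1 : Int) else 0)
            + (pvCntSeen p k (c.getD k []) : Int))).sum := by
      refine congrArg List.sum (List.map_congr_left ?_)
      intro k _
      unfold pvCntSeen
      rw [List.countP_cons]
      by_cases hh : k < d.length ∧ d.getD k [] = c.getD k [] <;> simp [hh] <;> push_cast <;> ring
    rw [hsplit, PySem.List.sum_map_add_int, PySem.List.sum_map_ite_one_zero, ih]
    have hg : gAg d c = ((List.range c.length).countP
        (fun k => decide (k < d.length ∧ d.getD k [] = c.getD k [])) : Int) := by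
      unfold gAg; rw [pv_countP_min]
    simp [hg]

lemma pv_exchangeB_tot (c : List (List Char)) :
    ∀ (p : List (List (List Char))),
    ((List.range c.length).map (fun k => (pvCntAt p k : Int))).sum
      = (p.map (fun d => gTot d c)).sum := by
  intro p
  induction p with
  | nil => simp [pvCntAt]
  | cons d p ih =>
    have hsplit : ((List.range c.length).map (fun k => (pvCntAt (d :: p) k : Int))).sum
        = ((List.range c.length).map (fun k =>
            (if (fun k => decide (k < d.length)) k then (1 : Int) else 0)
            + (pvCntAt p k : Int))).sum := by
      refine congrArg List.sum (List.map_congr_left ?_)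
      intro k _
      unfold pvCntAt
      rw [List.countP_cons]
      by_cases hh : k < d.length <;> simp [hh] <;> push_cast <;> ring
    rw [hsplit, PySem.List.sum_map_add_int, PySem.List.sum_map_ite_one_zero, ih]
    have hg : gTot d c = ((List.range c.length).countP (fun k => decide (k < d.length)) : Int) := by
      unfold gTot; rw [pv_countP_lt]
    simp [hg]

-- multiplicities of one labeler's entries among the tally keys
lemma pv_inj_enum (c : List (List Char)) :
    Function.Injective (fun (k : Nat) => ((k : Int), c.getD k [])) := by
  intro a b hab
  have := congrArg Prod.fst hab
  simpa using this

lemma pv_count_range (k n : Nat) : (List.range n).count k = if k < n then 1 else 0 := by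
  induction n with
  | zero => simp
  | succ n ih =>
    rw [List.range_succ, List.count_append, ih]
    by_cases h : k = n
    · subst h; simp
    · simp only [List.count_cons, List.count_nil, beq_iff_eq, if_neg h]
      split_ifs <;> omega

lemma pv_count_enum (c : List (List Char)) (k : Nat) (x : List Char) :
    (PySem.List.enumerate c).count ((k : Int), x)
      = if k < c.length ∧ c.getD k [] = x then 1 else 0 := by
  rw [pv_enum_eq]
  by_cases hx : k < c.length ∧ c.getD k [] = x
  · obtain ⟨hk, hgd⟩ := hx
    rw [if_pos ⟨hk, hgd⟩]
    have hrepr : ((k : Int), x) = (fun (k : Nat) => ((k : Int), c.getD k [])) k := by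
      rw [← hgd]
    rw [hrepr, List.count_map_of_injective _ _ (pv_inj_enum c) k, pv_count_range, if_pos hk]
  · rw [if_neg hx]
    refine List.count_eq_zero.mpr ?_
    intro hmem
    obtain ⟨k', hk', heq⟩ := List.mem_map.mp hmem
    have h1 : ((k' : Nat) : Int) = (k : Int) := congrArg Prod.fst heq
    have h2 : c.getD k' [] = x := congrArg Prod.snd heq
    have hkk : k' = k := by exact_mod_cast h1
    subst hkk
    exact hx ⟨List.mem_range.mp hk', h2⟩

lemma pv_count_enum_fst (c : List (List Char)) (k : Nat) :
    ((PySem.List.enumerate c).map Prod.fst).count (k : Int)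
      = if k < c.length then 1 else 0 := by
  rw [pv_enum_eq, List.map_map]
  have hcomp : (Prod.fst ∘ fun (k : Nat) => ((k : Int), c.getD k []))
      = (fun (k : Nat) => (k : Int)) := rfl
  rw [hcomp]
  have hinj : Function.Injective (fun (k : Nat) => (k : Int)) := fun a b hab => by
    simpa using hab
  rw [List.count_map_of_injective _ _ hinj k, pv_count_range]

-- the tally invariants survive one labeler
lemma pv_invS_step (p : List (List (List Char))) (c : List (List Char))
    (seen : PySem.Dict (Int × List Char) Int) (h : pvInvS seen p) :
    pvInvS ((PySem.List.enumerate c).foldl (fun d q => d.insert q (d.getD q 0 + 1)) seen)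
      (p ++ [c]) := by
  intro k x
  have hnd : ((PySem.List.enumerate c).map (fun q => q)).Nodup := by
    simp only [List.map_id']
    exact (pv_nodup_fst_enum c).of_map
  have := pv_getD_foldl_insert_key (fun q => q) (PySem.List.enumerate c) seen ((k : Int), x) hnd
  simp only [List.map_id'] at this
  rw [this, h k x]
  unfold pvCntSeen
  rw [List.countP_append, pv_count_enum]
  simp only [List.countP_cons, List.countP_nil]
  by_cases hh : k < c.length ∧ c.getD k [] = x <;> simp [hh] <;> push_cast <;> ring

lemma pv_invC_step (p : List (List (List Char))) (c : List (List Char))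
    (cnt : PySem.Dict Int Int) (h : pvInvC cnt p) :
    pvInvC ((PySem.List.enumerate c).foldl (fun d q => d.insert q.1 (d.getD q.1 0 + 1)) cnt)
      (p ++ [c]) := by
  intro k
  rw [pv_getD_foldl_insert_key Prod.fst (PySem.List.enumerate c) cnt (k : Int)
        (pv_nodup_fst_enum c), h k]
  unfold pvCntAt
  rw [List.countP_append, pv_count_enum_fst]
  simp only [List.countP_cons, List.countP_nil]
  by_cases hh : k < c.length <;> simp [hh] <;> push_cast <;> ring

-- B's outer pass
lemma pv_outerB :
    ∀ (cs p : List (List (List Char))) (ag tot : Int)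
      (seen : PySem.Dict (Int × List Char) Int) (cnt : PySem.Dict Int Int),
    pvInvS seen p → pvInvC cnt p →
    ∃ seen' cnt',
    cs.foldl (fun st c => (PySem.List.enumerate c).foldl pvStepB st) (ag, tot, seen, cnt)
      = (ag + (cs.map (fun c => (p.map (fun d => gAg d c)).sum)).sum + pairsAg cs,
         tot + (cs.map (fun c => (p.map (fun d => gTot d c)).sum)).sum + pairsTot cs,
         seen', cnt') := by
  intro cs
  induction cs with
  | nil =>
    intro p ag tot seen cnt _ _
    exact ⟨seen, cnt, by simp [pairsAg, pairsTot]⟩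
  | cons c cs ih =>
    intro p ag tot seen cnt hS hC
    simp only [List.foldl_cons]
    rw [pv_innerB (PySem.List.enumerate c) (pv_nodup_fst_enum c)]
    have hagc : ((PySem.List.enumerate c).map (fun q => seen.getD q 0)).sum
        = (p.map (fun d => gAg d c)).sum := by
      rw [pv_enum_eq, List.map_map, ← pv_exchangeB_ag c p]
      refine congrArg List.sum (List.map_congr_left ?_)
      intro k _
      exact hS k (c.getD k [])
    have htotc : ((PySem.List.enumerate c).map (fun q => cnt.getD q.1 0)).sum
        = (p.map (fun d => gTot d c)).sum := by
      rw [pv_enum_eq, List.map_map, ← pv_exchangeB_tot c p]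
      refine congrArg List.sum (List.map_congr_left ?_)
      intro k _
      exact hC k
    obtain ⟨seen', cnt', heq⟩ := ih (p ++ [c]) (ag + _) (tot + _) _ _
      (pv_invS_step p c seen hS) (pv_invC_step p c cnt hC)
    refine ⟨seen', cnt', ?_⟩
    rw [heq, hagc, htotc]
    have hcross : ∀ (g : List (List Char) → List (List Char) → Int),
        (cs.map (fun c' => ((p ++ [c]).map (fun d => g d c')).sum)).sum
        = (cs.map (fun c' => (p.map (fun d => g d c')).sum)).sum
          + (cs.map (fun c' => g c c')).sum := by
      intro g
      rw [← PySem.List.sum_map_add_int]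
      refine congrArg List.sum (List.map_congr_left ?_)
      intro c' _
      simp
    rw [hcross, hcross]
    refine Prod.ext ?_ (Prod.ext ?_ rfl)
    · show _ = ag + _ + pairsAg (c :: cs)
      rw [pairsAg]
      simp only [List.map_cons, List.sum_cons]
      ring
    · show _ = tot + _ + pairsTot (c :: cs)
      rw [pairsTot]
      simp only [List.map_cons, List.sum_cons]
      ring

-- B computes the structural pair sums
lemma pv_B_val (row : List String) :
    agreements_alt row = PySem.Int.toStr (pairsAg (row.map pvClean)) ++ "/"
      ++ PySem.Int.toStr (pairsTot (row.map pvClean)) := by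
  unfold agreements_alt
  simp only []
  rw [PySem.List.foldl_append_singleton_eq_map, List.nil_append]
  have hclean : row.map pvCleanB = row.map pvClean :=
    List.map_congr_left (fun s _ => pvCleanB_eq s)
  rw [hclean]
  have hS0 : pvInvS PySem.Dict.empty [] := by
    intro k x; simp [pvCntSeen]
  have hC0 : pvInvC PySem.Dict.empty [] := by
    intro k; simp [pvCntAt]
  obtain ⟨seen', cnt', heq⟩ := pv_outerB (row.map pvClean) [] 0 0 _ _ hS0 hC0
  rw [heq]
  have hz1 : ((row.map pvClean).map (fun c =>
      ((([] : List (List (List Char))).map (fun d => gAg d c))).sum)).sum = 0 := by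
    have hf : (fun (c : List (List Char)) =>
        ((([] : List (List (List Char))).map (fun d => gAg d c))).sum)
        = (fun (_ : List (List Char)) => (0 : Int)) := rfl
    rw [hf, PySem.List.sum_map_const_int]
    ring
  have hz2 : ((row.map pvClean).map (fun c =>
      ((([] : List (List (List Char))).map (fun d => gTot d c))).sum)).sum = 0 := by
    have hf : (fun (c : List (List Char)) =>
        ((([] : List (List (List Char))).map (fun d => gTot d c))).sum)
        = (fun (_ : List (List Char)) => (0 : Int)) := rfl
    rw [hf, PySem.List.sum_map_const_int]
    ring
  rw [hz1, hz2]
  norm_num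

-- ===== VERDICT (by name: the statement is the Claim_ definition above) =====
theorem agreements_spec : Claim_equal_agreements := by
  intro row _ hpre
  unfold Spec_agreements
  rw [pv_A_val row hpre, pv_B_val row]
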